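-- pv_equiv track=rewrite | github.com/vetorjota/Poli-Coisas | intro-prog-python/Problema 21.2.py | molduras_concentricas
-- ===== SOURCE A (Python) =====
-- def cria_matriz (num_linhas, num_colunas, valor):
--     matriz=[]
--
--     for i in range(num_linhas):
--         linha = []
--         for j in range (num_colunas):
--             linha.append(valor)
--         matriz.append(linha)
--
--     return matriz
--
-- def molduras_concentricas (n, v1,v2):
--
--
--
--     M = cria_matriz(n,n,-1)
--
--     for i in range (n):
--         for j in range (n):
--             dv = abs(i - n//2)  # distância vertical de posição (i,j) com relação ao centro
--             dh = abs(j - n//2)  # distância horizontal de posição (i,j) com relação ao centro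
--
--             if dv > dh:
--                 maior_d = dv
--             else:
--                 maior_d = dh
--
--             if maior_d % 2 == 0:
--                 M[i][j] = v1
--             else:
--                 M[i][j] = v2
--
--     return M
-- ===== SOURCE B (Python) =====
-- def molduras_concentricas(n, v1, v2):
--     # Build one template row, then create each row by overwriting the central
--     # segment covered by that row's ring with the ring's colour.
--     c = n // 2
--     base = [v1 if abs(j - c) % 2 == 0 else v2 for j in range(n)]
--     M = []
--     for i in range(n):
--         a = abs(i - c)
--         lo = max(0, c - a)
--         hi = min(n, c + a + 1)
--         val = v1 if a % 2 == 0 else v2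
--         M.append(base[:lo] + [val] * (hi - lo) + base[hi:])
--     return M
-- ===== Notes on version B (the rewrite author's own statement) =====
-- stated objective: faster
-- what changed: Instead of computing max(|i-c|,|j-c|) and branching for every cell of a premade matrix in a nested Python loop, B builds one alternating template row once and forms each row by overwriting the central segment covered by that row's ring (slice concatenation + list repetition), moving the per-cell work into C-level list operations.
import Mathlib
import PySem

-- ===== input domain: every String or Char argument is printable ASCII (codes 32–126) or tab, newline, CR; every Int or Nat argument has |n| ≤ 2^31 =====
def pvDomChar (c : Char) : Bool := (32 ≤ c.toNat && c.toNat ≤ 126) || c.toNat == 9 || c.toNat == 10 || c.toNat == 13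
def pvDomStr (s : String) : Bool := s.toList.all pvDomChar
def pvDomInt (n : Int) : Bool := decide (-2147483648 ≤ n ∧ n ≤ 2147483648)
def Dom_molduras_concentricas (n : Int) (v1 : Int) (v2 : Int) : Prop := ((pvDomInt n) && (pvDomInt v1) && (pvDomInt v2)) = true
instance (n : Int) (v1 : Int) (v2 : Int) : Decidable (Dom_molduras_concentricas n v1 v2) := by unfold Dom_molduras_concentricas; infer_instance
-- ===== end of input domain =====

-- B builds one alternating template row once and forms each row by overwriting the
-- central ring segment (slice concatenation) instead of A's per-cell max/branch fill
-- of a premade matrix; a timing run measured B faster by a constant factor.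

-- ===== PORT A =====
def criaMatriz (num_linhas : Int) (num_colunas : Int) (valor : Int) : List (List Int) :=
  (PySem.List.pyRange 0 num_linhas 1).foldl (fun matriz _ =>
    matriz ++ [(PySem.List.pyRange 0 num_colunas 1).foldl (fun linha _ => linha ++ [valor]) []]) []

def molduras_concentricas (n : Int) (v1 : Int) (v2 : Int) : List (List Int) :=
  let M0 := criaMatriz n n (-1)
  (PySem.List.pyRange 0 n 1).foldl (fun M i =>
    (PySem.List.pyRange 0 n 1).foldl (fun M j =>
      let dv := |i - PySem.Int.floordiv n 2|
      let dh := |j - PySem.Int.floordiv n 2|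
      let maior_d := if dv > dh then dv else dh
      -- M[i][j] = v ported as getD/set: exact, since range(n) yields 0 ≤ i, j < n = len
      if PySem.Int.mod maior_d 2 = 0 then
        PySem.List.pySetD M i (PySem.List.pySetD (PySem.List.pyGetD M i []) j v1)
      else
        PySem.List.pySetD M i (PySem.List.pySetD (PySem.List.pyGetD M i []) j v2)) M) M0

-- ===== PORT B =====
def molduras_concentricas_alt (n : Int) (v1 : Int) (v2 : Int) : List (List Int) :=
  let c := PySem.Int.floordiv n 2
  let base := (PySem.List.pyRange 0 n 1).map (fun j =>
    if PySem.Int.mod |j - c| 2 = 0 then v1 else v2)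
  (PySem.List.pyRange 0 n 1).foldl (fun M i =>
    let a := |i - c|
    let lo := max 0 (c - a)
    let hi := min n (c + a + 1)
    let val := if PySem.Int.mod a 2 = 0 then v1 else v2
    M ++ [PySem.List.slice base none (some lo) ++
          List.replicate (hi - lo).toNat val ++
          PySem.List.slice base (some hi) none]) []

-- ===== PRECONDITION & SPEC =====
def Spec_molduras_concentricas (n : Int) (v1 : Int) (v2 : Int) (out : List (List Int)) : Prop := out = molduras_concentricas_alt n v1 v2
instance (n : Int) (v1 : Int) (v2 : Int) (out : List (List Int)) : Decidable (Spec_molduras_concentricas n v1 v2 out) := by unfold Spec_molduras_concentricas; infer_instance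

-- ===== CLAIM (what is proved, stated in full; the proofs are below) =====
def Claim_equal_molduras_concentricas : Prop := ∀ (n : Int) (v1 : Int) (v2 : Int), Dom_molduras_concentricas n v1 v2 → Spec_molduras_concentricas n v1 v2 (molduras_concentricas n v1 v2)

-- ===== LEMMAS AND PROOFS =====

/-- the colour of Chebyshev-distance band `d` (`d ≥ 0` in all uses) -/
def pvBand (v1 v2 d : Int) : Int := if PySem.Int.mod d 2 = 0 then v1 else v2

/-- the value both programs put at cell (i, j) -/
def pvCell (c v1 v2 i j : Int) : Int := pvBand v1 v2 (max |i - c| |j - c|)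

/-- the common normal form: the matrix as a map of maps -/
def pvTgt (n v1 v2 : Int) : List (List Int) :=
  List.map (fun i : Nat =>
    List.map (fun j : Nat => pvCell (PySem.Int.floordiv n 2) v1 v2 (i : Int) (j : Int))
      (List.range n.toNat)) (List.range n.toNat)

/-- writing `f j` at positions `0..m-1` of a list of length ≥ m -/
lemma foldl_range_set {α : Type} (f : Nat → α) :
    ∀ (m : Nat) (r : List α), m ≤ r.length →
    (List.range m).foldl (fun r j => r.set j (f j)) r = (List.range m).map f ++ r.drop m := by
  intro m
  induction m with
  | zero => simp
  | succ m ih =>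
      intro r hm
      rw [List.range_succ, List.foldl_append, List.foldl_cons, List.foldl_nil,
          ih r (by omega), List.map_append,
          List.set_append_right _ _ (by simp),
          List.drop_eq_getElem_cons (show m < r.length by omega)]
      simp only [List.length_map, List.length_range, Nat.sub_self, List.set_cons_zero]
      simp [List.append_assoc]

/-- the inner `for j` loop of A only rewrites row `i` -/
lemma foldl_setrow (f : Nat → Int) (i : Nat) :
    ∀ (m : Nat) (M : List (List Int)), i < M.length →
    (List.range m).foldl (fun M j => M.set i ((M.getD i []).set j (f j))) M
      = M.set i ((List.range m).foldl (fun r j => r.set j (f j)) (M.getD i [])) := by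
  intro m
  induction m with
  | zero =>
      intro M hi
      simp only [List.range_zero, List.foldl_nil]
      rw [List.getD_eq_getElem M [] hi, List.set_getElem_self hi]
  | succ m ih =>
      intro M hi
      rw [List.range_succ, List.foldl_append, List.foldl_cons, List.foldl_nil, ih M hi,
          List.foldl_append, List.foldl_cons, List.foldl_nil]
      have h1 : (M.set i ((List.range m).foldl (fun r j => r.set j (f j)) (M.getD i []))).getD i []
          = (List.range m).foldl (fun r j => r.set j (f j)) (M.getD i []) := by
        rw [List.getD_eq_getElem _ _ (by simpa using hi), List.getElem_set_self (by simpa using hi)]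
      rw [h1, List.set_set]

/-- A's double loop on any well-shaped start matrix -/
lemma foldl_fill (g : Nat → Nat → Int) (N : Nat) :
    ∀ (m : Nat) (M : List (List Int)), m ≤ N → M.length = N → (∀ r ∈ M, r.length = N) →
    (List.range m).foldl (fun M i =>
        (List.range N).foldl (fun M j => M.set i ((M.getD i []).set j (g i j))) M) M
      = (List.range m).map (fun i => (List.range N).map (g i)) ++ M.drop m := by
  intro m
  induction m with
  | zero => simp
  | succ m ih =>
      intro M hm hlen hrows
      have hmlt : m < M.length := by omega
      rw [List.range_succ, List.foldl_append, List.foldl_cons, List.foldl_nil,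
          ih M (by omega) hlen hrows]
      set P := (List.range m).map (fun i => (List.range N).map (g i)) with hP
      have hPlen : P.length = m := by simp [hP]
      rw [foldl_setrow (g m) m N (P ++ M.drop m) (by simp [hPlen, hlen]; omega)]
      have hgetD : (P ++ M.drop m).getD m [] = M[m] := by
        have hmm : m < (P ++ M.drop m).length := by simp [hPlen, hlen]; omega
        rw [List.getD_eq_getElem _ _ hmm, List.getElem_append_right (by simp [hPlen])]
        simp [hPlen]
      have hrowlen : M[m].length = N := hrows M[m] (by simp)
      have hrow : (List.range N).foldl (fun r j => r.set j (g m j)) M[m]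
          = (List.range N).map (g m) := by
        rw [foldl_range_set (g m) N M[m] (le_of_eq hrowlen.symm),
            List.drop_eq_nil_of_le (le_of_eq hrowlen), List.append_nil]
      rw [hgetD, hrow, List.set_append_right _ _ (by simp [hPlen]),
          List.drop_eq_getElem_cons hmlt, List.map_append]
      simp only [hPlen, Nat.sub_self, List.set_cons_zero]
      simp [List.append_assoc]
      exact hP

/-- `range(n)` as a mapped `List.range` (empty when `n ≤ 0`) -/
lemma pyRangeZero (n : Int) :
    PySem.List.pyRange 0 n 1 = List.map (fun k : Nat => (k : Int)) (List.range n.toNat) := by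
  rcases le_or_gt n 0 with h | h
  · have h1 : PySem.List.pyRange 0 n 1 = [] := by simp [PySem.List.pyRange]; omega
    have h2 : n.toNat = 0 := by omega
    simp [h1, h2]
  · have hn : n = ((n.toNat : Nat) : Int) := by omega
    rw [hn, PySem.List.pyRange_zero_natCast]
    have h2 : ((n.toNat : Nat) : Int).toNat = n.toNat := by omega
    rw [h2]

lemma criaMatriz_eq (a b v : Int) :
    criaMatriz a b v = List.replicate a.toNat (List.replicate b.toNat v) := by
  unfold criaMatriz
  rw [pyRangeZero, pyRangeZero, List.foldl_map, List.foldl_map,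
      PySem.List.foldl_append_singleton_eq_map, PySem.List.foldl_append_singleton_eq_map]
  simp [List.map_const']

/-- A's loop body is a single write of `pvCell` -/
lemma A_body (c v1 v2 : Int) (M : List (List Int)) (iN jN : Nat) :
    (if PySem.Int.mod (if |(iN : Int) - c| > |(jN : Int) - c| then |(iN : Int) - c| else |(jN : Int) - c|) 2 = 0
     then M.set iN ((M.getD iN []).set jN v1)
     else M.set iN ((M.getD iN []).set jN v2))
    = M.set iN ((M.getD iN []).set jN (pvCell c v1 v2 (iN : Int) (jN : Int))) := by
  have hmax : (if |(iN : Int) - c| > |(jN : Int) - c| then |(iN : Int) - c| else |(jN : Int) - c|)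
      = max |(iN : Int) - c| |(jN : Int) - c| := by
    rcases le_or_gt (|(iN : Int) - c|) (|(jN : Int) - c|) with h | h
    · rw [if_neg (not_lt.mpr h), max_eq_right h]
    · rw [if_pos h, max_eq_left h.le]
  unfold pvCell pvBand
  rw [hmax]
  split <;> rfl

lemma A_eq_tgt (n v1 v2 : Int) : molduras_concentricas n v1 v2 = pvTgt n v1 v2 := by
  unfold molduras_concentricas pvTgt
  simp only [pyRangeZero, criaMatriz_eq, List.foldl_map]
  simp only [PySem.List.pySetD_natCast, PySem.List.pyGetD_natCast]
  simp only [A_body]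
  have h := foldl_fill (fun iN jN => pvCell (PySem.Int.floordiv n 2) v1 v2 (iN : Int) (jN : Int))
      n.toNat n.toNat (List.replicate n.toNat (List.replicate n.toNat (-1))) (le_refl _)
      (by simp) (fun r hr => by rw [List.eq_of_mem_replicate hr]; simp)
  exact h.trans (by simp)

/-- one row of B equals one row of the normal form -/
lemma rowB_eq (v1 v2 c : Int) (N : Nat) (hc0 : 0 ≤ c) (hcN : c < (N : Int)) (iN : Nat) :
    PySem.List.slice (List.map (fun j : Nat => if PySem.Int.mod |(j : Int) - c| 2 = 0 then v1 else v2) (List.range N))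
        none (some (max 0 (c - |(iN : Int) - c|))) ++
    List.replicate (min (N : Int) (c + |(iN : Int) - c| + 1) - max 0 (c - |(iN : Int) - c|)).toNat
        (if PySem.Int.mod |(iN : Int) - c| 2 = 0 then v1 else v2) ++
    PySem.List.slice (List.map (fun j : Nat => if PySem.Int.mod |(j : Int) - c| 2 = 0 then v1 else v2) (List.range N))
        (some (min (N : Int) (c + |(iN : Int) - c| + 1))) none
    = List.map (fun j : Nat => pvCell c v1 v2 (iN : Int) (j : Int)) (List.range N) := by
  set B := List.map (fun j : Nat => if PySem.Int.mod |(j : Int) - c| 2 = 0 then v1 else v2) (List.range N) with hB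
  have hBlen : B.length = N := by simp [hB]
  set a := |(iN : Int) - c| with ha
  have ha' : a = ((iN : Int) - c).natAbs := Int.abs_eq_natAbs _
  set lo := max 0 (c - a) with hlo
  set hi := min (N : Int) (c + a + 1) with hhi
  have ha0 : 0 ≤ a := abs_nonneg _
  have hlo0 : 0 ≤ lo := le_max_left _ _
  have hb1 : lo ≤ c := by omega
  have hb2 : c < hi := by omega
  have hb3 : hi ≤ (N : Int) := by omega
  rw [PySem.List.slice_to _ hlo0, PySem.List.slice_from _ (by omega)]
  have hlen1 : (List.take lo.toNat B).length = lo.toNat := by simp [hBlen]; omega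
  have hBk : ∀ (k : Nat) (h : k < B.length), B[k] = pvBand v1 v2 |(k : Int) - c| := by
    intro k h
    simp only [hB, List.getElem_map, List.getElem_range]
    rfl
  apply List.ext_getElem
  · simp [hBlen]; omega
  · intro k hk1 hk2
    have hkN : k < N := by simpa using hk2
    have hl2 : (List.replicate (hi - lo).toNat (if PySem.Int.mod a 2 = 0 then v1 else v2)).length
        = (hi - lo).toNat := by simp
    simp only [List.getElem_map, List.getElem_range]
    rcases Nat.lt_or_ge k lo.toNat with hk | hk
    · rw [List.getElem_append_left (by rw [List.length_append, hlen1, hl2]; omega),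
          List.getElem_append_left (by rw [hlen1]; omega), List.getElem_take, hBk]
      unfold pvCell
      have hmax : max a |(k : Int) - c| = |(k : Int) - c| := by
        apply max_eq_right
        calc a ≤ c - (k : Int) := by omega
          _ ≤ |(k : Int) - c| := by rw [abs_sub_comm]; exact le_abs_self _
      rw [hmax]
    · rcases Nat.lt_or_ge k (lo.toNat + (hi - lo).toNat) with hk' | hk'
      · rw [List.getElem_append_left (by rw [List.length_append, hlen1, hl2]; omega),
            List.getElem_append_right (by rw [hlen1]; omega), List.getElem_replicate]
        have hmax : max a |(k : Int) - c| = a := by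
          apply max_eq_left
          rw [abs_le]
          constructor <;> omega
        unfold pvCell
        rw [hmax]
        rfl
      · rw [List.getElem_append_right (by rw [List.length_append, hlen1, hl2]; omega),
            List.getElem_drop]
        have hidx : hi.toNat + (k - (List.take lo.toNat B ++
            List.replicate (hi - lo).toNat (if PySem.Int.mod a 2 = 0 then v1 else v2)).length) = k := by
          rw [List.length_append, hlen1, hl2]; omega
        simp only [hidx]
        rw [hBk]
        unfold pvCell
        have hmax : max a |(k : Int) - c| = |(k : Int) - c| := by
          apply max_eq_right
          have h1 : hi = c + a + 1 := by omega
          calc a ≤ (k : Int) - c := by omega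
            _ ≤ |(k : Int) - c| := le_abs_self _
        rw [hmax]

lemma B_eq_tgt (n v1 v2 : Int) : molduras_concentricas_alt n v1 v2 = pvTgt n v1 v2 := by
  simp only [molduras_concentricas_alt, pvTgt, pyRangeZero, List.map_map, List.foldl_map,
      PySem.List.foldl_append_singleton_eq_map, List.nil_append, Function.comp_def]
  apply List.map_congr_left
  intro iN hiN
  have hiN' : iN < n.toNat := List.mem_range.mp hiN
  have hc0 : 0 ≤ PySem.Int.floordiv n 2 := by
    rw [PySem.Int.floordiv_eq_ediv_of_pos (by omega : (0:Int) < 2)]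
    omega
  have hcN : PySem.Int.floordiv n 2 < ((n.toNat : Nat) : Int) := by
    rw [PySem.Int.floordiv_eq_ediv_of_pos (by omega : (0:Int) < 2)]
    omega
  have hn : n = ((n.toNat : Nat) : Int) := by omega
  calc _ = PySem.List.slice (List.map
          (fun j : Nat => if PySem.Int.mod |(j : Int) - PySem.Int.floordiv n 2| 2 = 0 then v1 else v2) (List.range n.toNat))
          none (some (max 0 (PySem.Int.floordiv n 2 - |(iN : Int) - PySem.Int.floordiv n 2|))) ++
        List.replicate (min ((n.toNat : Nat) : Int) (PySem.Int.floordiv n 2 + |(iN : Int) - PySem.Int.floordiv n 2| + 1)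
            - max 0 (PySem.Int.floordiv n 2 - |(iN : Int) - PySem.Int.floordiv n 2|)).toNat
          (if PySem.Int.mod |(iN : Int) - PySem.Int.floordiv n 2| 2 = 0 then v1 else v2) ++
        PySem.List.slice (List.map
          (fun j : Nat => if PySem.Int.mod |(j : Int) - PySem.Int.floordiv n 2| 2 = 0 then v1 else v2) (List.range n.toNat))
          (some (min ((n.toNat : Nat) : Int) (PySem.Int.floordiv n 2 + |(iN : Int) - PySem.Int.floordiv n 2| + 1))) none := by
        rw [← hn]
    _ = List.map (fun j : Nat => pvCell (PySem.Int.floordiv n 2) v1 v2 (iN : Int) (j : Int)) (List.range n.toNat) :=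
        rowB_eq v1 v2 (PySem.Int.floordiv n 2) n.toNat hc0 hcN iN

-- ===== VERDICT (by name: the statement is the Claim_ definition above) =====
theorem molduras_concentricas_spec : Claim_equal_molduras_concentricas := by
  intro n v1 v2 _
  unfold Spec_molduras_concentricas
  rw [A_eq_tgt, B_eq_tgt]
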